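-- pv_equiv track=rewrite | github.com/Ouehbi/2048-Game | 2048.py | decaler
-- ===== SOURCE A (Python) =====
-- def decaler(row):
--     k = 0
--     while k < 3:
--         if row[k] == 0:
--             i = 3
--             while i > k:
--                 if row[i] != 0 and row[i - 1] == 0:
--                     row[i - 1] = row[i]
--                     row[i] = 0
--                 i -= 1
--         k += 1
--     return row
-- ===== SOURCE B (Python) =====
-- def decaler(row):
--     head = row[:4]
--     nz = [x for x in head if x != 0]
--     row[:4] = nz + [0] * (len(head) - len(nz))
--     return row
-- ===== Notes on version B (the rewrite author's own statement) =====
-- stated objective: simpler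
-- what changed: Replaces A's nested bubble passes (outer k-scan with inner right-to-left swap sweeps over fixed indices 0..3) by a single filter of the non-zero entries of row[:4] plus zero-padding, written back in place.
import Mathlib
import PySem

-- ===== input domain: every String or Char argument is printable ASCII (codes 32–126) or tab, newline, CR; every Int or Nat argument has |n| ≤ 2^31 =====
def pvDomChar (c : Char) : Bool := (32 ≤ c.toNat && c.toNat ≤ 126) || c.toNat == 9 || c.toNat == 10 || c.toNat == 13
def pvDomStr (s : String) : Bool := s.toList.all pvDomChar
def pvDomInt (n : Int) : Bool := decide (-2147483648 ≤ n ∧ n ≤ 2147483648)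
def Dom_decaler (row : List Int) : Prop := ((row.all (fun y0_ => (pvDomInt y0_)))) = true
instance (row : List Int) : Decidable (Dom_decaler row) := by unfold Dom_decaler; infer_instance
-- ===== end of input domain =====

-- B replaces A's nested bubble passes over indices 0..3 by one filter of the
-- non-zero entries of row[:4] plus zero padding (objective: simpler).
-- Note: A mutates `row` in place and returns it; the equivalence proved here is
-- about the returned value (B performs the same in-place mutation in Python).

-- ===== PORT A =====
-- inner body: 'if row[i] != 0 and row[i-1] == 0: row[i-1] = row[i]; row[i] = 0'.
-- Python indexing raises IndexError out of range; List.getD is used here, which is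
-- exact on every input admitted by Pre_decaler (all indices touched are in range there).
def decalerInner (row : List Int) (i : Nat) : List Int :=
  if row.getD i 0 ≠ 0 ∧ row.getD (i - 1) 0 = 0 then
    (row.set (i - 1) (row.getD i 0)).set i 0
  else row

-- outer body for one k: 'if row[k] == 0: i = 3; while i > k: …; i -= 1'
def decalerStep (row : List Int) (k : Nat) : List Int :=
  if row.getD k 0 = 0 then
    ((List.range' (k + 1) (3 - k)).reverse).foldl decalerInner row
  else row

-- 'k = 0; while k < 3: …; k += 1'
def decaler (row : List Int) : List Int :=
  [0, 1, 2].foldl decalerStep row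

-- ===== PORT B =====
def decaler_alt (row : List Int) : List Int :=
  let head := PySem.List.slice row none (some 4)
  let nz := head.filter (fun x => x ≠ 0)
  nz ++ List.replicate (head.length - nz.length) 0 ++ row.drop 4

-- ===== PRECONDITION & SPEC =====
-- Pre_ excludes exactly the inputs on which Python A raises IndexError:
-- rows shorter than 3, and rows of length 3 containing a 0 (the inner sweep reads index 3).
def Pre_decaler (row : List Int) : Prop :=
  4 ≤ row.length ∨ (row.length = 3 ∧ ¬ (0 ∈ row))
instance (row : List Int) : Decidable (Pre_decaler row) := by unfold Pre_decaler; infer_instance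

def pvWitness_decaler : List Int := [0, 5, 0, 7]

def Spec_decaler (row : List Int) (out : List Int) : Prop := out = decaler_alt row
instance (row : List Int) (out : List Int) : Decidable (Spec_decaler row out) := by unfold Spec_decaler; infer_instance

-- ===== CLAIM (what is proved, stated in full; the proofs are below) =====
def Claim_equal_decaler : Prop := ∀ (row : List Int), Dom_decaler row → Pre_decaler row → Spec_decaler row (decaler row)

-- ===== LEMMAS AND PROOFS =====

theorem decaler_long (a b c d : Int) (t : List Int) :
    decaler (a :: b :: c :: d :: t) = decaler_alt (a :: b :: c :: d :: t) := by
  by_cases ha : a = 0 <;> by_cases hb : b = 0 <;> by_cases hc : c = 0 <;> by_cases hd : d = 0 <;>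
    simp [decaler, decaler_alt, decalerStep, decalerInner, ha, hb, hc, hd,
      PySem.List.slice, PySem.List.clampIdx, List.range', List.filter]

theorem decaler_three (a b c : Int) (ha : a ≠ 0) (hb : b ≠ 0) (hc : c ≠ 0) :
    decaler [a, b, c] = decaler_alt [a, b, c] := by
  simp [decaler, decaler_alt, decalerStep, ha, hb, hc,
    PySem.List.slice, PySem.List.clampIdx, List.filter]

-- ===== VERDICT (by name: the statement is the Claim_ definition above) =====
theorem decaler_spec : Claim_equal_decaler := by
  intro row _ hpre
  unfold Spec_decaler
  rcases hpre with hlen | ⟨hlen, hmem⟩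
  · match row, hlen with
    | a :: b :: c :: d :: t, _ => exact (decaler_long a b c d t).symm ▸ rfl
  · match row, hlen with
    | [a, b, c], _ =>
      simp only [List.mem_cons, List.not_mem_nil, or_false] at hmem
      push Not at hmem
      exact (decaler_three a b c (fun h => hmem.1 h.symm) (fun h => hmem.2.1 h.symm)
        (fun h => hmem.2.2 h.symm)).symm ▸ rfl
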